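-- pv_equiv track=rewrite | github.com/gayoungpark/aoc2019 | 22.py | part2
-- ===== SOURCE A (Python) =====
-- def part2(shuffles):
--     size = 119315717514047
--
--     start, jump = 0, 1
--     for shuffle in shuffles:
--         technique = shuffle.split(' ')
--         if len(technique) == 2:
--             # cut n
--             n = int(technique[-1])
--             start = (start + jump * n) % size
--         elif technique[2] == 'increment':
--             # deal with increment n
--             n = int(technique[-1])
--             mod_inv = modinv(n, size)
--             jump = (jump * mod_inv) % size
--         else:
--             # deal into new stack
--             jump = (jump * (size - 1)) % size
--             start = (start + jump) % size
--     start, jump = repeat(start, jump, 101741582076661, size)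
--
--     return (start + 2020 * jump) % size
--
-- def repeat(s, m, k, p):
--     m_k = pow(m, k, p)
--     s_k = (s * ((1 - m_k) % p) * modinv((1 - m) % p, p)) % p
--     return s_k, m_k
--
-- def egcd(a, b):
--     if a == 0:
--         return (b, 0, 1)
--     else:
--         g, y, x = egcd(b % a, a)
--         return (g, x - (b // a) * y, y)
--
-- def modinv(a, m):
--     g, x, y = egcd(a, m)
--     if g != 1:
--         raise Exception('modular inverse does not exist')
--     else:
--         return x % m
-- ===== SOURCE B (Python) =====
-- def part2(shuffles):
--     size = 119315717514047
--     # fold every technique into one affine map M = (a, b), meaning x -> (a*x + b) % size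
--     a, b = 1, 0
--     for line in shuffles:
--         t = line.split(' ')
--         if len(t) == 2:
--             # cut n  ==  x -> x + n
--             ga, gb = 1, int(t[-1]) % size
--         elif t[2] == 'increment':
--             # deal with increment n  ==  x -> n^-1 * x
--             ga, gb = pow(int(t[-1]), -1, size), 0
--         else:
--             # deal into new stack  ==  x -> -x - 1
--             ga, gb = size - 1, size - 1
--         a, b = a * ga % size, (a * gb + b) % size
--     # raise M to the repeat count by binary exponentiation (affine composition)
--     ra, rb = 1, 0
--     k = 101741582076661
--     while k:
--         if k & 1:
--             ra, rb = ra * a % size, (ra * b + rb) % size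
--         a, b = a * a % size, (a * b + b) % size
--         k >>= 1
--     return (rb + 2020 * ra) % size
-- ===== Notes on version B (the rewrite author's own statement) =====
-- stated objective: alternative
-- what changed: B folds every technique into a single affine map (a,b) by composition and raises it to the repeat count 101741582076661 by binary exponentiation of the map, instead of A's separate start/jump updates followed by a geometric-series closed form that needs the modular inverse of (1 - jump); B's increment step uses Python's built-in pow(n, -1, size) instead of a recursive extended Euclid.
import Mathlib
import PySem

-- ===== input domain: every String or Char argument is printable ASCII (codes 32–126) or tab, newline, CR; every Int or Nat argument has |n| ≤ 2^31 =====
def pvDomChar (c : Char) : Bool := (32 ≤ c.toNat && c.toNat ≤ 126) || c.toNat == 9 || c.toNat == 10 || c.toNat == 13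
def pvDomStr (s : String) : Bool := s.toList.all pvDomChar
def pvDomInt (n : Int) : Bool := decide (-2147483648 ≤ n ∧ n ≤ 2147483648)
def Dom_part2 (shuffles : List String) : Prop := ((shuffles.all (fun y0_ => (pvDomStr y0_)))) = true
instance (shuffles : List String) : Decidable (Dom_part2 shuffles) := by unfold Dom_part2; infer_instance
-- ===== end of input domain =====

-- B replaces A's start/jump bookkeeping and geometric-series closed form (which divides by 1-jump)
-- by folding each technique into one affine map and raising it to the repeat count by binary
-- exponentiation; return values agree wherever A returns, and B also returns where A's final
-- division by (1 - jump) raises.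

-- ===== PORT A =====

-- egcd(a, b): Python's recursion, floor division and floor mod via PySem.Int
def pvEgcd (a b : Int) : Int × Int × Int :=
  if a = 0 then (b, 0, 1)
  else
    let r := pvEgcd (PySem.Int.mod b a) a
    (r.1, r.2.2 - (PySem.Int.floordiv b a) * r.2.1, r.2.1)
termination_by a.natAbs
decreasing_by
  rename_i ha
  rcases lt_or_gt_of_ne ha with h | h
  · have := PySem.Int.mod_neg_bounds b h
    omega
  · have h1 := PySem.Int.mod_nonneg b h
    have h2 := PySem.Int.mod_lt b h
    omega

-- modinv(a, m): none = the 'modular inverse does not exist' exception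
def pvModinv (a m : Int) : Option Int :=
  let r := pvEgcd a m
  if r.1 ≠ 1 then none else some (PySem.Int.mod r.2.1 m)

-- one iteration of A's loop; none = IndexError / ValueError / modinv exception
def pvStepA (st : Int × Int) (shuffle : String) : Option (Int × Int) :=
  let technique := (PySem.Str.split? shuffle " ").getD []   -- separator " " ≠ "": split? is always some
  if technique.length = 2 then
    (PySem.List.pyGet? technique (-1)).bind fun w =>
    (PySem.Int.ofStr? w).map fun n =>
      (PySem.Int.mod (st.1 + st.2 * n) 119315717514047, st.2)
  else
    (PySem.List.pyGet? technique 2).bind fun t2 =>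
    if t2 = "increment" then
      (PySem.List.pyGet? technique (-1)).bind fun w =>
      (PySem.Int.ofStr? w).bind fun n =>
      (pvModinv n 119315717514047).map fun mi =>
        (st.1, PySem.Int.mod (st.2 * mi) 119315717514047)
    else
      let jump := PySem.Int.mod (st.2 * (119315717514047 - 1)) 119315717514047
      some (PySem.Int.mod (st.1 + jump) 119315717514047, jump)

-- pow(b, e, m): Python's built-in three-argument pow, ported as square-and-multiply so it
-- evaluates; pvPowMod_eq below proves it equal to PySem.Int.mod (b ^ e) m, i.e. pow's spec
def pvPowMod (b : Int) (e : Nat) (m : Int) : Int :=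
  if e = 0 then PySem.Int.mod 1 m
  else
    let h := pvPowMod b (e / 2) m
    let h2 := PySem.Int.mod (h * h) m
    if e % 2 = 1 then PySem.Int.mod (h2 * b) m else h2
termination_by e
decreasing_by omega

-- repeat(s, m, k, p)
def pvRepeatA (s m : Int) (k : Nat) (p : Int) : Option (Int × Int) :=
  let m_k := pvPowMod m k p
  (pvModinv (PySem.Int.mod (1 - m) p) p).map fun inv =>
    (PySem.Int.mod (s * (PySem.Int.mod (1 - m_k) p) * inv) p, m_k)

def part2 (shuffles : List String) : Int :=
  ((shuffles.foldlM pvStepA (0, 1)).bind fun st =>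
    (pvRepeatA st.1 st.2 101741582076661 119315717514047).map fun r =>
      PySem.Int.mod (r.1 + 2020 * r.2) 119315717514047).getD 0

-- ===== PORT B =====

-- pow(n, -1, size): Python's built-in modular inverse, ported via the Bézout coefficient;
-- exact: for gcd(n,size)=1 both return the unique inverse in [0,size), else ValueError = none
def pvInv (n : Int) : Option Int :=
  if Int.gcd n 119315717514047 = 1 then some (Int.gcdA n 119315717514047 % 119315717514047) else none

-- one iteration of B's loop: compose the accumulated affine map with this technique's map
def pvStepB (M : Int × Int) (line : String) : Option (Int × Int) :=
  let t := (PySem.Str.split? line " ").getD []   -- separator " " ≠ "": split? is always some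
  let g? : Option (Int × Int) :=
    if t.length = 2 then
      (PySem.List.pyGet? t (-1)).bind fun w =>
      (PySem.Int.ofStr? w).map fun n => ((1 : Int), n % 119315717514047)
    else
      (PySem.List.pyGet? t 2).bind fun t2 =>
      if t2 = "increment" then
        (PySem.List.pyGet? t (-1)).bind fun w =>
        (PySem.Int.ofStr? w).bind fun n =>
        (pvInv n).map fun v => (v, (0 : Int))
      else some (119315717514047 - 1, 119315717514047 - 1)
  g?.map fun g => (M.1 * g.1 % 119315717514047, (M.1 * g.2 + M.2) % 119315717514047)
  -- '% size' with size > 0: Python '%' = Int.emod here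

-- B's 'while k:' loop; the fuel argument only makes the recursion structural (the loop body
-- runs fewer than fuel = k times since k halves each iteration), it changes no computation
def pvBinexp (fuel : Nat) (R P : Int × Int) (k : Nat) : Int × Int :=
  match fuel with
  | 0 => R
  | fuel + 1 =>
    if k = 0 then R
    else
      pvBinexp fuel
        (if k % 2 = 1 then (R.1 * P.1 % 119315717514047, (R.1 * P.2 + R.2) % 119315717514047) else R)
        (P.1 * P.1 % 119315717514047, (P.1 * P.2 + P.2) % 119315717514047)
        (k / 2)

def part2_alt (shuffles : List String) : Int :=
  ((shuffles.foldlM pvStepB (1, 0)).map fun M =>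
    let R := pvBinexp 101741582076661 (1, 0) M 101741582076661
    (R.2 + 2020 * R.1) % 119315717514047).getD 0

-- ===== PRECONDITION & SPEC =====

inductive PvTech
  | cut (n : Int)
  | inc (n : Int)
  | new
deriving DecidableEq, Repr

-- the shape A's loop accepts a line in: 2 tokens = cut, token 2 = 'increment' = deal with
-- increment (A's modinv succeeds exactly for 0 < n coprime to the deck size), else ≥ 3 tokens = new stack
def pvParse (s : String) : Option PvTech :=
  let t := (PySem.Str.split? s " ").getD []
  if t.length = 2 then
    ((PySem.List.pyGet? t (-1)).bind PySem.Int.ofStr?).map PvTech.cut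
  else
    (PySem.List.pyGet? t 2).bind fun t2 =>
    if t2 = "increment" then
      ((PySem.List.pyGet? t (-1)).bind PySem.Int.ofStr?).bind fun n =>
      if 0 < n ∧ Int.gcd n 119315717514047 = 1 then some (.inc n) else none
    else some .new

def pvProd (ts : List PvTech) : Int :=
  ts.foldl (fun p t => match t with | .inc n => p * n | _ => p) 1

def pvNews (ts : List PvTech) : Nat :=
  ts.countP (fun t => t = PvTech.new)

-- Pre_ excludes exactly the inputs on which A raises: a line that does not parse (IndexError /
-- ValueError / modinv exception on a non-positive or non-coprime increment), and shuffle lists whose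
-- composed jump factor is ≡ 1 mod the deck size — equivalently gcd(prod − (−1)^news, size) ≠ 1 —
-- where repeat's modinv((1−jump) % size) raises.
def Pre_part2 (shuffles : List String) : Prop :=
  (match shuffles.mapM pvParse with
    | none => false
    | some ts => Int.gcd (pvProd ts - (-1) ^ (pvNews ts)) 119315717514047 == 1) = true
instance (shuffles : List String) : Decidable (Pre_part2 shuffles) := by
  unfold Pre_part2; infer_instance

def pvWitness_part2 : List String := ["deal with increment 3"]

def Spec_part2 (shuffles : List String) (out : Int) : Prop := out = part2_alt shuffles
instance (shuffles : List String) (out : Int) : Decidable (Spec_part2 shuffles out) := by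
  unfold Spec_part2; infer_instance

-- ===== CLAIM (what is proved, stated in full; the proofs are below) =====
def Claim_equal_part2 : Prop :=
  ∀ (shuffles : List String), Dom_part2 shuffles → Pre_part2 shuffles →
    Spec_part2 shuffles (part2 shuffles)

-- ===== LEMMAS AND PROOFS =====

-- pvPowMod agrees with pow's specification 
theorem pvPowMod_eq (b : Int) (e : Nat) (m : Int) (hm : 0 < m) :
    pvPowMod b e m = (b ^ e) % m := by
  fun_induction pvPowMod b e m
  next =>
    rw [PySem.Int.mod_eq_emod_of_pos hm]
    norm_num
  next e he hlet h2let ho ih =>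
    show PySem.Int.mod
      (PySem.Int.mod (pvPowMod b (e / 2) m * pvPowMod b (e / 2) m) m * b) m = b ^ e % m
    rw [ih]
    simp only [PySem.Int.mod_eq_emod_of_pos hm]
    have c1 : (b ^ (e / 2) % m) ≡ b ^ (e / 2) [ZMOD m] := Int.emod_emod_of_dvd _ dvd_rfl
    have c3 : (b ^ (e / 2) % m * (b ^ (e / 2) % m)) % m ≡ b ^ (e / 2) * b ^ (e / 2) [ZMOD m] :=
      (Int.emod_emod_of_dvd _ dvd_rfl).trans (c1.mul c1)
    have c4 := c3.mul_right b
    have c5 : b ^ (e / 2) * b ^ (e / 2) * b = b ^ e := by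
      rw [← pow_add, ← pow_succ]
      congr 1
      omega
    exact c5 ▸ c4
  next e he hlet h2let ho ih =>
    show PySem.Int.mod (pvPowMod b (e / 2) m * pvPowMod b (e / 2) m) m = b ^ e % m
    rw [ih]
    simp only [PySem.Int.mod_eq_emod_of_pos hm]
    have c1 : (b ^ (e / 2) % m) ≡ b ^ (e / 2) [ZMOD m] := Int.emod_emod_of_dvd _ dvd_rfl
    have c2 := c1.mul c1
    have c5 : b ^ (e / 2) * b ^ (e / 2) = b ^ e := by
      rw [← pow_add]
      congr 1
      omega
    exact c5 ▸ c2


theorem pvEgcd_bezout (a b : Int) :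
    a * (pvEgcd a b).2.1 + b * (pvEgcd a b).2.2 = (pvEgcd a b).1 := by
  fun_induction pvEgcd a b with
  | case1 b => simp
  | case2 a b ha r ih =>
    simp only [r] at ih ⊢
    have hd := PySem.Int.floordiv_mul_add_mod b a
    set g := pvEgcd (PySem.Int.mod b a) a with hg
    linear_combination ih - g.2.1 * hd

theorem pvGcdCongr (a b n : Int) (h : a ≡ b [ZMOD n]) : Int.gcd a n = Int.gcd b n := by
  obtain ⟨t, ht⟩ := (Int.modEq_iff_dvd.mp h)
  have hd1 : (↑(Int.gcd a n) : Int) ∣ b := by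
    have hb : b = a + n * t := by linarith
    rw [hb]
    exact dvd_add (Int.gcd_dvd_left a n) (Dvd.dvd.mul_right (Int.gcd_dvd_right a n) t)
  have hd2 : (↑(Int.gcd b n) : Int) ∣ a := by
    have hb : a = b - n * t := by linarith
    rw [hb]
    exact dvd_sub (Int.gcd_dvd_left b n) (Dvd.dvd.mul_right (Int.gcd_dvd_right b n) t)
  exact Nat.dvd_antisymm (Int.dvd_gcd hd1 (Int.gcd_dvd_right a n))
    (Int.dvd_gcd hd2 (Int.gcd_dvd_right b n))

theorem pvEgcd_gcd (a b : Int) (ha : 0 ≤ a) (hb : 0 ≤ b) :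
    (pvEgcd a b).1 = Int.gcd a b := by
  revert ha hb
  fun_induction pvEgcd a b with
  | case1 b => intro _ hb; simp; exact (abs_of_nonneg hb).symm
  | case2 a b ha' r ih =>
    intro ha _
    have hpos : 0 < a := lt_of_le_of_ne ha (Ne.symm ha')
    have h1 := PySem.Int.mod_nonneg b hpos
    simp only [r]
    rw [ih h1 ha]
    have : PySem.Int.mod b a ≡ b [ZMOD a] := by
      rw [PySem.Int.mod_eq_emod_of_pos hpos]
      unfold Int.ModEq
      rw [Int.emod_emod_of_dvd _ dvd_rfl]
    rw [pvGcdCongr _ _ _ this, Int.gcd_comm]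

theorem pvCastMod (a : Int) :
    ((a % 119315717514047 : Int) : ZMod 119315717514047) = (a : ZMod 119315717514047) := by
  have := ZMod.intCast_mod a 119315717514047
  norm_num at this
  exact this

theorem pvCastPyMod (a : Int) :
    ((PySem.Int.mod a 119315717514047 : Int) : ZMod 119315717514047) = (a : ZMod 119315717514047) := by
  rw [PySem.Int.mod_eq_emod_of_pos (by norm_num)]
  exact pvCastMod a

theorem pvModinv_isSome (a : Int) (h0 : 0 ≤ a) (hg : Int.gcd a 119315717514047 = 1) :
    ∃ v, pvModinv a 119315717514047 = some v := by
  have h1 : (pvEgcd a 119315717514047).1 = 1 := by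
    rw [pvEgcd_gcd a 119315717514047 h0 (by norm_num), hg]
    norm_num
  refine ⟨PySem.Int.mod (pvEgcd a 119315717514047).2.1 119315717514047, ?_⟩
  unfold pvModinv
  simp [h1]

theorem pvModinv_cast (a v : Int) (h : pvModinv a 119315717514047 = some v) :
    (a : ZMod 119315717514047) * (v : ZMod 119315717514047) = 1 := by
  unfold pvModinv at h
  by_cases hg : (pvEgcd a 119315717514047).1 = 1
  · simp only [hg] at h
    norm_num at h
    have hb := pvEgcd_bezout a 119315717514047
    rw [hg] at hb
    have : (v : ZMod 119315717514047) = ((pvEgcd a 119315717514047).2.1 : ZMod 119315717514047) := by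
      rw [← h, pvCastMod]
    rw [this]
    have hc := congrArg (fun z : Int => (z : ZMod 119315717514047)) hb
    push_cast at hc
    have hz : (119315717514047 : ZMod 119315717514047) = 0 := by
      exact_mod_cast ZMod.natCast_self 119315717514047
    rw [hz] at hc
    simpa using hc
  · simp [hg] at h

theorem pvInv_cast (n w : Int) (h : pvInv n = some w) :
    (n : ZMod 119315717514047) * (w : ZMod 119315717514047) = 1 := by
  unfold pvInv at h
  by_cases hg : Int.gcd n 119315717514047 = 1
  · simp only [hg, if_pos] at h
    norm_num at h
    have hb := Int.gcd_eq_gcd_ab n 119315717514047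
    rw [hg] at hb
    have : (w : ZMod 119315717514047) = ((Int.gcdA n 119315717514047 : Int) : ZMod 119315717514047) := by
      rw [← h, pvCastMod]
    rw [this]
    have hc := congrArg (fun z : Int => (z : ZMod 119315717514047)) hb
    push_cast at hc
    have hz : (119315717514047 : ZMod 119315717514047) = 0 := by
      exact_mod_cast ZMod.natCast_self 119315717514047
    rw [hz] at hc
    simp at hc
    linear_combination -hc
  · simp [hg] at h

theorem pvN1 : (119315717514046 : ZMod 119315717514047) = -1 := by
  have h0 : (119315717514047 : ZMod 119315717514047) = 0 := by
    exact_mod_cast ZMod.natCast_self 119315717514047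
  have h1 : (119315717514046 : ZMod 119315717514047) + 1 = 0 := by
    norm_num
    exact h0
  exact eq_neg_of_add_eq_zero_left h1

theorem pvCastN1 : ((119315717514047 - 1 : Int) : ZMod 119315717514047) = -1 := by
  push_cast
  exact pvN1

theorem pvProd_cons (t : PvTech) (ts : List PvTech) :
    pvProd (t :: ts) = (match t with | .inc n => n | _ => 1) * pvProd ts := by
  have key : ∀ (l : List PvTech) (i j : Int),
      l.foldl (fun p t => match t with | .inc n => p * n | _ => p) (i * j) =
        i * l.foldl (fun p t => match t with | .inc n => p * n | _ => p) j := by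
    intro l
    induction l with
    | nil => intro i j; rfl
    | cons t l ih =>
      intro i j
      cases t <;> simp only [List.foldl_cons] <;> rw [← ih] <;> ring_nf
  cases t with
  | cut n => simp [pvProd, key]
  | inc n =>
    simp only [pvProd, List.foldl_cons]
    rw [show ((1 : Int) * n) = n * 1 by ring, key]
  | new => simp [pvProd, key]

theorem pvStep_cut (line : String) (n : Int) (st M : Int × Int)
    (h : pvParse line = some (.cut n)) :
    pvStepA st line = some (PySem.Int.mod (st.1 + st.2 * n) 119315717514047, st.2) ∧
    pvStepB M line = some (M.1 * 1 % 119315717514047,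
      (M.1 * (n % 119315717514047) + M.2) % 119315717514047) := by
  unfold pvParse at h
  unfold pvStepA pvStepB
  set t := (PySem.Str.split? line " ").getD [] with ht
  by_cases hl : t.length = 2
  · simp only [if_pos hl] at h ⊢
    cases hget : PySem.List.pyGet? t (-1) with
    | none => simp [hget] at h
    | some w =>
      cases hof : PySem.Int.ofStr? w with
      | none => simp [hget, hof] at h
      | some n' =>
        simp [hget, hof] at h ⊢
        subst h
        exact ⟨rfl, rfl⟩
  · simp only [if_neg hl] at h ⊢
    cases hget : PySem.List.pyGet? t 2 with
    | none => simp [hget] at h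
    | some t2 =>
      by_cases hinc : t2 = "increment"
      · simp only [hget, Option.bind_some, if_pos hinc] at h
        cases hget1 : PySem.List.pyGet? t (-1) with
        | none => simp [hget1] at h
        | some w =>
          cases hof : PySem.Int.ofStr? w with
          | none => simp [hget1, hof] at h
          | some n' =>
            simp only [hget1, hof, Option.bind_some] at h
            split at h <;> simp at h
      · simp [hget, hinc] at h

theorem pvStep_inc (line : String) (n : Int) (st M : Int × Int)
    (h : pvParse line = some (.inc n)) :
    ∃ v w, pvModinv n 119315717514047 = some v ∧ pvInv n = some w ∧
    pvStepA st line = some (st.1, PySem.Int.mod (st.2 * v) 119315717514047) ∧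
    pvStepB M line = some (M.1 * w % 119315717514047, (M.1 * 0 + M.2) % 119315717514047) := by
  unfold pvParse at h
  unfold pvStepA pvStepB
  set t := (PySem.Str.split? line " ").getD [] with ht
  by_cases hl : t.length = 2
  · simp only [if_pos hl] at h ⊢
    cases hget : PySem.List.pyGet? t (-1) with
    | none => simp [hget] at h
    | some w =>
      cases hof : PySem.Int.ofStr? w with
      | none => simp [hget, hof] at h
      | some n' => simp [hget, hof] at h
  · simp only [if_neg hl] at h ⊢
    cases hget : PySem.List.pyGet? t 2 with
    | none => simp [hget] at h
    | some t2 =>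
      by_cases hinc : t2 = "increment"
      · simp only [hget, Option.bind_some, if_pos hinc] at h ⊢
        cases hget1 : PySem.List.pyGet? t (-1) with
        | none => simp [hget1] at h
        | some w =>
          cases hof : PySem.Int.ofStr? w with
          | none => simp [hget1, hof] at h
          | some n' =>
            simp only [hget1, hof, Option.bind_some] at h ⊢
            by_cases hcond : 0 < n' ∧ Int.gcd n' 119315717514047 = 1
            · rw [if_pos hcond] at h
              simp at h
              subst h
              obtain ⟨v, hv⟩ := pvModinv_isSome n' (le_of_lt hcond.1) hcond.2
              refine ⟨v, Int.gcdA n' 119315717514047 % 119315717514047, hv, ?_, ?_, ?_⟩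
              · unfold pvInv
                rw [if_pos hcond.2]
              · simp [hv]
              · simp [pvInv, hcond.2]
            · rw [if_neg hcond] at h
              simp at h
      · simp [hget, hinc] at h

theorem pvStep_new (line : String) (st M : Int × Int)
    (h : pvParse line = some .new) :
    pvStepA st line = some
      (PySem.Int.mod (st.1 + PySem.Int.mod (st.2 * (119315717514047 - 1)) 119315717514047) 119315717514047,
       PySem.Int.mod (st.2 * (119315717514047 - 1)) 119315717514047) ∧
    pvStepB M line = some (M.1 * (119315717514047 - 1) % 119315717514047,
      (M.1 * (119315717514047 - 1) + M.2) % 119315717514047) := by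
  unfold pvParse at h
  unfold pvStepA pvStepB
  set t := (PySem.Str.split? line " ").getD [] with ht
  by_cases hl : t.length = 2
  · simp only [if_pos hl] at h ⊢
    cases hget : PySem.List.pyGet? t (-1) with
    | none => simp [hget] at h
    | some w =>
      cases hof : PySem.Int.ofStr? w with
      | none => simp [hget, hof] at h
      | some n' => simp [hget, hof] at h
  · simp only [if_neg hl] at h ⊢
    cases hget : PySem.List.pyGet? t 2 with
    | none => simp [hget] at h
    | some t2 =>
      by_cases hinc : t2 = "increment"
      · simp only [hget, Option.bind_some, if_pos hinc] at h
        cases hget1 : PySem.List.pyGet? t (-1) with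
        | none => simp [hget1] at h
        | some w =>
          cases hof : PySem.Int.ofStr? w with
          | none => simp [hget1, hof] at h
          | some n' =>
            simp only [hget1, hof, Option.bind_some] at h
            split at h <;> simp at h
      · simp [hget, hinc]

theorem pvLoop (lines : List String) (ts : List PvTech) (st M : Int × Int)
    (hp : lines.mapM pvParse = some ts)
    (h1 : (st.2 : ZMod 119315717514047) = (M.1 : ZMod 119315717514047))
    (h2 : (st.1 : ZMod 119315717514047) = (M.2 : ZMod 119315717514047)) :
    ∃ st' M', lines.foldlM pvStepA st = some st' ∧ lines.foldlM pvStepB M = some M' ∧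
      (st'.2 : ZMod 119315717514047) = (M'.1 : ZMod 119315717514047) ∧
      (st'.1 : ZMod 119315717514047) = (M'.2 : ZMod 119315717514047) ∧
      (st'.2 : ZMod 119315717514047) * ((pvProd ts : Int) : ZMod 119315717514047) =
        (st.2 : ZMod 119315717514047) * (-1) ^ (pvNews ts) := by
  induction lines generalizing ts st M with
  | nil =>
    simp only [List.mapM_nil, Option.pure_def, Option.some_inj] at hp
    subst hp
    exact ⟨st, M, rfl, rfl, h1, h2, by simp [pvProd, pvNews]⟩
  | cons line ls ih =>
    rw [List.mapM_cons] at hp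
    cases hpl : pvParse line with
    | none => rw [hpl] at hp; simp at hp
    | some t =>
      rw [hpl] at hp
      cases hpm : List.mapM pvParse ls with
      | none => rw [hpm] at hp; simp at hp
      | some ts' =>
        rw [hpm] at hp
        simp at hp
        subst hp
        cases t with
        | cut n =>
          obtain ⟨hA, hB⟩ := pvStep_cut line n st M hpl
          rw [List.foldlM_cons, List.foldlM_cons, hA, hB]
          obtain ⟨st', M', f1, f2, e1, e2, e3⟩ := ih ts'
            (PySem.Int.mod (st.1 + st.2 * n) 119315717514047, st.2)
            (M.1 * 1 % 119315717514047, (M.1 * (n % 119315717514047) + M.2) % 119315717514047)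
            hpm
            (by dsimp only; push_cast [pvCastMod, pvCastPyMod]; rw [h1]; try ring)
            (by dsimp only; push_cast [pvCastMod, pvCastPyMod]; rw [h1, h2]; try ring)
          refine ⟨st', M', f1, f2, e1, e2, ?_⟩
          rw [pvProd_cons]
          simp only [pvNews, List.countP_cons]
          norm_num
          push_cast
          rw [e3]
          dsimp only
          unfold pvNews
          ring
        | inc n =>
          obtain ⟨v, w, hv, hw, hA, hB⟩ := pvStep_inc line n st M hpl
          have hvc := pvModinv_cast n v hv
          have hwc := pvInv_cast n w hw
          have hvw : (v : ZMod 119315717514047) = (w : ZMod 119315717514047) := by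
            calc (v : ZMod 119315717514047) = ((n : ZMod 119315717514047) * w) * v := by
                  rw [hwc]; ring
              _ = ((n : ZMod 119315717514047) * v) * w := by ring
              _ = w := by rw [hvc]; ring
          rw [List.foldlM_cons, List.foldlM_cons, hA, hB]
          obtain ⟨st', M', f1, f2, e1, e2, e3⟩ := ih ts'
            (st.1, PySem.Int.mod (st.2 * v) 119315717514047)
            (M.1 * w % 119315717514047, (M.1 * 0 + M.2) % 119315717514047)
            hpm
            (by dsimp only; push_cast [pvCastMod, pvCastPyMod]; rw [h1, hvw]; try ring)
            (by dsimp only; push_cast [pvCastMod, pvCastPyMod]; rw [h2]; try ring)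
          refine ⟨st', M', f1, f2, e1, e2, ?_⟩
          rw [pvProd_cons]
          simp only [pvNews, List.countP_cons]
          norm_num
          push_cast
          dsimp only at e3
          rw [pvCastPyMod] at e3
          push_cast at e3
          calc (st'.2 : ZMod 119315717514047) * ((n : ZMod 119315717514047) * (pvProd ts' : Int)) =
              ((st'.2 : ZMod 119315717514047) * ((pvProd ts' : Int) : ZMod 119315717514047)) * n := by
                push_cast; ring
            _ = (st.2 : ZMod 119315717514047) * (v : ZMod 119315717514047) * (-1) ^ (pvNews ts') * n := by
                rw [e3]
            _ = (st.2 : ZMod 119315717514047) * ((n : ZMod 119315717514047) * v) * (-1) ^ (pvNews ts') := by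
                ring
            _ = (st.2 : ZMod 119315717514047) * (-1) ^ (pvNews ts') := by rw [hvc]; ring
        | new =>
          obtain ⟨hA, hB⟩ := pvStep_new line st M hpl
          rw [List.foldlM_cons, List.foldlM_cons, hA, hB]
          obtain ⟨st', M', f1, f2, e1, e2, e3⟩ := ih ts'
            (PySem.Int.mod (st.1 + PySem.Int.mod (st.2 * (119315717514047 - 1)) 119315717514047) 119315717514047,
              PySem.Int.mod (st.2 * (119315717514047 - 1)) 119315717514047)
            (M.1 * (119315717514047 - 1) % 119315717514047,
              (M.1 * (119315717514047 - 1) + M.2) % 119315717514047)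
            hpm
            (by dsimp only; push_cast [pvCastMod, pvCastPyMod]; rw [h1]; try ring)
            (by dsimp only; push_cast [pvCastMod, pvCastPyMod]; rw [h1, h2]; try ring)
          refine ⟨st', M', f1, f2, e1, e2, ?_⟩
          rw [pvProd_cons]
          simp only [pvNews, List.countP_cons]
          norm_num
          push_cast
          dsimp only at e3
          rw [pvCastPyMod] at e3
          push_cast [pvCastN1] at e3
          rw [e3]
          unfold pvNews
          rw [pvN1]
          ring

theorem pvGeomDouble (x : ZMod 119315717514047) (j : Nat) :
    (∑ i ∈ Finset.range (2 * j), x ^ i) =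
      (1 + x) * ∑ i ∈ Finset.range j, (x * x) ^ i := by
  induction j with
  | zero => simp
  | succ j ih =>
    have h2 : 2 * (j + 1) = 2 * j + 1 + 1 := by ring
    rw [h2, Finset.sum_range_succ, Finset.sum_range_succ, Finset.sum_range_succ, ih,
      show x * x = x ^ 2 from by ring, ← pow_mul]
    ring

theorem pvBinexp_cast (fuel : Nat) : ∀ (k : Nat) (R P : Int × Int), k ≤ fuel →
    (((pvBinexp fuel R P k).1 : Int) : ZMod 119315717514047) =
        (R.1 : ZMod 119315717514047) * (P.1 : ZMod 119315717514047) ^ k ∧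
    (((pvBinexp fuel R P k).2 : Int) : ZMod 119315717514047) =
        (R.1 : ZMod 119315717514047) *
          ((P.2 : ZMod 119315717514047) * ∑ i ∈ Finset.range k, (P.1 : ZMod 119315717514047) ^ i) +
        (R.2 : ZMod 119315717514047) := by
  induction fuel with
  | zero =>
    intro k R P hk
    interval_cases k
    simp [pvBinexp]
  | succ fuel ih =>
    intro k R P hk
    by_cases hk0 : k = 0
    · subst hk0
      simp [pvBinexp]
    · rw [show pvBinexp (fuel + 1) R P k =
        pvBinexp fuel
          (if k % 2 = 1 then (R.1 * P.1 % 119315717514047, (R.1 * P.2 + R.2) % 119315717514047) else R)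
          (P.1 * P.1 % 119315717514047, (P.1 * P.2 + P.2) % 119315717514047)
          (k / 2) from by rw [pvBinexp]; rw [if_neg hk0]]
      have hk2 : k / 2 ≤ fuel := by omega
      set j := k / 2 with hj
      by_cases hodd : k % 2 = 1
      · rw [if_pos hodd]
        obtain ⟨ih1, ih2⟩ := ih j
          (R.1 * P.1 % 119315717514047, (R.1 * P.2 + R.2) % 119315717514047)
          (P.1 * P.1 % 119315717514047, (P.1 * P.2 + P.2) % 119315717514047) hk2
        have hk' : k = 2 * j + 1 := by omega
        constructor
        · rw [ih1]
          dsimp only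
          push_cast [pvCastMod]
          rw [hk']
          rw [pow_succ, pow_mul]
          push_cast
          ring
        · rw [ih2]
          dsimp only
          push_cast [pvCastMod]
          rw [hk']
          rw [geom_sum_succ, pvGeomDouble]
          push_cast
          ring
      · rw [if_neg hodd]
        obtain ⟨ih1, ih2⟩ := ih j R
          (P.1 * P.1 % 119315717514047, (P.1 * P.2 + P.2) % 119315717514047) hk2
        have hk' : k = 2 * j := by omega
        constructor
        · rw [ih1]
          dsimp only
          push_cast [pvCastMod]
          rw [hk', pow_mul]
          push_cast
          ring
        · rw [ih2]
          dsimp only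
          push_cast [pvCastMod]
          rw [hk', pvGeomDouble]
          push_cast
          ring

theorem pvEmodCongr (x y : Int)
    (h : (x : ZMod 119315717514047) = (y : ZMod 119315717514047)) :
    x % 119315717514047 = y % 119315717514047 := by
  have := (ZMod.intCast_eq_intCast_iff x y 119315717514047).mp h
  exact_mod_cast this

-- ===== VERDICT (by name: the statement is the Claim_ definition above) =====
theorem part2_spec : Claim_equal_part2 := by
  intro shuffles _ hpre
  unfold Spec_part2
  unfold Pre_part2 at hpre
  cases hm : shuffles.mapM pvParse with
  | none => rw [hm] at hpre; simp at hpre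
  | some ts =>
    rw [hm] at hpre
    simp only [beq_iff_eq, decide_eq_true_eq] at hpre
    obtain ⟨st', M', f1, f2, e1, e2, e3⟩ := pvLoop shuffles ts (0, 1) (1, 0) hm (by norm_num) (by norm_num)
    have e3' : (st'.2 : ZMod 119315717514047) * ((pvProd ts : Int) : ZMod 119315717514047) =
        (-1) ^ (pvNews ts) := by
      rw [e3]; norm_num
    have hcong : ((1 - st'.2) * pvProd ts : Int) ≡ (pvProd ts - (-1) ^ (pvNews ts)) [ZMOD (119315717514047 : Int)] := by
      have hc : (((1 - st'.2) * pvProd ts : Int) : ZMod 119315717514047) =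
          ((pvProd ts - (-1) ^ (pvNews ts) : Int) : ZMod 119315717514047) := by
        push_cast
        linear_combination -e3'
      exact_mod_cast (ZMod.intCast_eq_intCast_iff _ _ 119315717514047).mp hc
    have hg1 : Int.gcd ((1 - st'.2) * pvProd ts) 119315717514047 = 1 := by
      rw [pvGcdCongr _ _ _ hcong]
      exact hpre
    have hgm : Int.gcd (1 - st'.2) 119315717514047 = 1 :=
      Nat.dvd_one.mp (hg1 ▸ Int.dvd_gcd
        (Dvd.dvd.mul_right (Int.gcd_dvd_left (1 - st'.2) 119315717514047) (pvProd ts))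
        (Int.gcd_dvd_right (1 - st'.2) 119315717514047))
    have hmodc : (PySem.Int.mod (1 - st'.2) 119315717514047) ≡ (1 - st'.2) [ZMOD (119315717514047 : Int)] := by
      rw [PySem.Int.mod_eq_emod_of_pos (by norm_num : (0:Int) < 119315717514047)]
      show (1 - st'.2) % 119315717514047 % 119315717514047 = (1 - st'.2) % 119315717514047
      exact Int.emod_emod_of_dvd _ dvd_rfl
    have hgmod : Int.gcd (PySem.Int.mod (1 - st'.2) 119315717514047) 119315717514047 = 1 := by
      rw [pvGcdCongr _ _ _ hmodc]
      exact hgm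
    obtain ⟨v, hv⟩ := pvModinv_isSome _ (PySem.Int.mod_nonneg _ (by norm_num)) hgmod
    have hvc := pvModinv_cast _ v hv
    rw [pvCastPyMod] at hvc
    push_cast at hvc
    obtain ⟨hb1, hb2⟩ := pvBinexp_cast 101741582076661 101741582076661 (1, 0) M' le_rfl
    unfold part2 part2_alt pvRepeatA
    rw [f1, f2]
    simp only [Option.bind_some]
    rw [hv]
    simp only [Option.map_some, Option.getD_some]
    rw [PySem.Int.mod_eq_emod_of_pos (by norm_num : (0:Int) < 119315717514047)]
    apply pvEmodCongr
    have hS : ((st'.1 : ZMod 119315717514047)) * (∑ i ∈ Finset.range 101741582076661, (st'.2 : ZMod 119315717514047) ^ i) =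
        (st'.1 : ZMod 119315717514047) * (1 - (st'.2 : ZMod 119315717514047) ^ 101741582076661) * (v : ZMod 119315717514047) := by
      have hgeom : ((1 : ZMod 119315717514047) - (st'.2 : ZMod 119315717514047)) *
          (∑ i ∈ Finset.range 101741582076661, (st'.2 : ZMod 119315717514047) ^ i) =
          1 - (st'.2 : ZMod 119315717514047) ^ 101741582076661 := by
        have hgs := geom_sum_mul ((st'.2 : ZMod 119315717514047)) 101741582076661
        linear_combination -hgs
      calc (st'.1 : ZMod 119315717514047) * (∑ i ∈ Finset.range 101741582076661, (st'.2 : ZMod 119315717514047) ^ i) =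
          (st'.1 : ZMod 119315717514047) * (∑ i ∈ Finset.range 101741582076661, (st'.2 : ZMod 119315717514047) ^ i) *
            (((1 : ZMod 119315717514047) - (st'.2 : ZMod 119315717514047)) * (v : ZMod 119315717514047)) := by
            rw [hvc]; ring
        _ = (st'.1 : ZMod 119315717514047) *
            (((1 : ZMod 119315717514047) - (st'.2 : ZMod 119315717514047)) *
              (∑ i ∈ Finset.range 101741582076661, (st'.2 : ZMod 119315717514047) ^ i)) * (v : ZMod 119315717514047) := by
            ring
        _ = (st'.1 : ZMod 119315717514047) * (1 - (st'.2 : ZMod 119315717514047) ^ 101741582076661) * (v : ZMod 119315717514047) := by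
            rw [hgeom]
    rw [pvPowMod_eq _ _ _ (by norm_num : (0:Int) < 119315717514047)]
    push_cast [pvCastPyMod, pvCastMod]
    rw [hb1, hb2]
    dsimp only
    push_cast
    rw [← e1, ← e2, hS]
    ring
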